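-- pv_equiv track=rewrite | github.com/sharifovparvizistbd13/15 | лабб2.py | count_consecutive_ones
-- ===== SOURCE A (Python) =====
-- def count_consecutive_ones(num):
--     binary = bin(num)[2:]  # Получаем двоичное представление числа, исключая префикс '0b'
--     consecutive = 0
--     start_position = -1
--
--     for i in range(len(binary)):
--         if binary[i] == '1':
--             if consecutive == 0:
--                 start_position = i
--             consecutive += 1
--             if consecutive > 2:
--                 return -1  # Если найдена серия из более чем двух подряд идущих единиц, возвращаем -1
--         else:
--             consecutive = 0
--
--     return start_position
-- ===== SOURCE B (Python) =====
-- def count_consecutive_ones(num):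
--     binary = bin(num)[2:]
--     n = len(binary)
--     ans = -1
--     pos = 0
--     while pos < n:
--         end = pos
--         while end < n and binary[end] == binary[pos]:
--             end += 1
--         if binary[pos] == '1':
--             if end - pos > 2:
--                 return -1
--             ans = pos
--         pos = end
--     return ans
-- ===== Notes on version B (the rewrite author's own statement) =====
-- stated objective: alternative
-- what changed: Replaces A's per-character scan with a consecutive counter by a two-pointer walk over maximal runs of equal characters, remembering the start of the last '1'-run and bailing out on a run longer than 2.
import Mathlib
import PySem

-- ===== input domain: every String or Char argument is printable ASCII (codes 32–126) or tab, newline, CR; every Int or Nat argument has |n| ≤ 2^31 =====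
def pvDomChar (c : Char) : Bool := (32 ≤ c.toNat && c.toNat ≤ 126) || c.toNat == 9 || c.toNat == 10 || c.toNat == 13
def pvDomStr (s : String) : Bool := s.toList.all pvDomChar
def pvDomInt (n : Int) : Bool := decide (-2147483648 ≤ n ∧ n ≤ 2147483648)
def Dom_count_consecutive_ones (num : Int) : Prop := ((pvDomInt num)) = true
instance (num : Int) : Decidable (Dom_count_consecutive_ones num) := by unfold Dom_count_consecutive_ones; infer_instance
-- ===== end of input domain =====

-- B replaces A's per-character scan with a consecutive counter by a two-pointer walk
-- over maximal runs of equal characters; same cost, different decomposition.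

-- ===== PORT A =====
-- shared helper: Python's bin(num)[2:] as a list of characters.
-- binary digits of a Nat, most significant first ([] for 0)
def pvBinDigits : Nat → List Char
  | 0 => []
  | n + 1 => pvBinDigits ((n + 1) / 2) ++ [if (n + 1) % 2 == 1 then '1' else '0']
  decreasing_by omega

-- bin(num)[2:]: for negative num Python gives '-0b…', so [2:] starts with 'b'
def pvBinStr (num : Int) : List Char :=
  if num < 0 then 'b' :: pvBinDigits (-num).toNat
  else if num == 0 then ['0']
  else pvBinDigits num.toNat

-- A's for-loop over binary[i]: i the running index, consecutive / start_position the accumulators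
def aLoop : List Char → Int → Int → Int → Int
  | [], _, _, start_position => start_position
  | c :: t, i, consecutive, start_position =>
    if c == '1' then
      let start_position := if consecutive == 0 then i else start_position
      let consecutive := consecutive + 1
      if consecutive > 2 then -1
      else aLoop t (i + 1) consecutive start_position
    else aLoop t (i + 1) 0 start_position

def count_consecutive_ones (num : Int) : Int :=
  aLoop (pvBinStr num) 0 0 (-1)

-- ===== PORT B =====
-- B's outer while loop; the inner while (advancing `end` over equal chars) is the
-- maximal run takeWhile / dropWhile of the current character
def bLoop (l : List Char) (pos ans : Int) : Int :=
  match l with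
  | [] => ans
  | c :: t =>
    let run := (c :: t).takeWhile (· == c)
    let rest := (c :: t).dropWhile (· == c)
    if c == '1' then
      if (run.length : Int) > 2 then -1
      else bLoop rest (pos + run.length) pos
    else bLoop rest (pos + run.length) ans
  termination_by l.length
  decreasing_by
    all_goals
      simp only [List.dropWhile_cons, beq_self_eq_true, if_true, List.length_cons]
      exact Nat.lt_succ_of_le (List.length_dropWhile_le _ _)

def count_consecutive_ones_alt (num : Int) : Int :=
  bLoop (pvBinStr num) 0 (-1)

-- ===== PRECONDITION & SPEC =====
def Spec_count_consecutive_ones (num : Int) (out : Int) : Prop := out = count_consecutive_ones_alt num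
instance (num : Int) (out : Int) : Decidable (Spec_count_consecutive_ones num out) := by unfold Spec_count_consecutive_ones; infer_instance

-- ===== CLAIM (what is proved, stated in full; the proofs are below) =====
def Claim_equal_count_consecutive_ones : Prop := ∀ (num : Int), Dom_count_consecutive_ones num → Spec_count_consecutive_ones num (count_consecutive_ones num)

-- ===== LEMMAS AND PROOFS =====

lemma aLoop_reset (l : List Char) (i cons start : Int)
    (h : ∀ c, l.head? = some c → c ≠ '1') :
    aLoop l i cons start = aLoop l i 0 start := by
  cases l with
  | nil => rfl
  | cons c t =>
    have hc : (c == '1') = false := by simpa using h c rfl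
    simp [aLoop, hc]

lemma aLoop_skip (pre : List Char) (h : ∀ x ∈ pre, x ≠ '1') :
    ∀ (rest : List Char) (i ans : Int),
      aLoop (pre ++ rest) i 0 ans = aLoop rest (i + pre.length) 0 ans := by
  induction pre with
  | nil => intro rest i ans; simp
  | cons x p ih =>
    intro rest i ans
    have hx : (x == '1') = false := by simpa using h x List.mem_cons_self
    have hp : ∀ y ∈ p, y ≠ '1' := fun y hy => h y (List.mem_cons_of_mem _ hy)
    simp only [List.cons_append, aLoop, hx, Bool.false_eq_true, if_false]
    rw [ih hp]
    congr 1
    simp [List.length_cons]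
    omega

lemma aLoop_ones (l : List Char) : ∀ (i cons start : Int), 1 ≤ cons → cons ≤ 2 →
    aLoop l i cons start =
      if 2 < cons + ((l.takeWhile (· == '1')).length : Int) then -1
      else aLoop (l.dropWhile (· == '1')) (i + (l.takeWhile (· == '1')).length)
             (cons + (l.takeWhile (· == '1')).length) start := by
  induction l with
  | nil =>
    intro i cons start h1 h2
    simp only [List.takeWhile_nil, List.dropWhile_nil, List.length_nil, Nat.cast_zero,
      add_zero]
    rw [if_neg (by omega)]
  | cons c t ih =>
    intro i cons start h1 h2
    by_cases hc : c = '1'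
    · subst hc
      have hcons : (cons == 0) = false := by simp; omega
      simp only [aLoop, List.takeWhile_cons, List.dropWhile_cons, beq_self_eq_true, if_true,
        hcons, Bool.false_eq_true, if_false, List.length_cons]
      by_cases hbig : cons + 1 > 2
      · rw [if_pos hbig, if_pos (by push_cast; omega)]
      · rw [if_neg hbig, ih (i + 1) (cons + 1) start (by omega) (by omega)]
        by_cases hb2 : 2 < cons + 1 + ((t.takeWhile (· == '1')).length : Int)
        · rw [if_pos hb2, if_pos (by push_cast at hb2 ⊢; omega)]
        · rw [if_neg hb2, if_neg (by push_cast at hb2 ⊢; omega)]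
          congr 1 <;> push_cast <;> ring
    · have hcb : (c == '1') = false := by simpa using hc
      simp only [List.takeWhile_cons, List.dropWhile_cons, hcb, Bool.false_eq_true, if_false,
        List.length_nil, Nat.cast_zero, add_zero]
      rw [if_neg (by omega)]

lemma head_dropWhile (p : Char → Bool) (l : List Char) :
    ∀ c, (l.dropWhile p).head? = some c → p c = false := by
  induction l with
  | nil => intro c h; simp at h
  | cons x t ih =>
    intro c h
    by_cases hx : p x
    · rw [List.dropWhile_cons, if_pos hx] at h; exact ih c h
    · rw [List.dropWhile_cons, if_neg hx] at h
      simp only [List.head?_cons, Option.some.injEq] at h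
      subst h
      simpa using hx

theorem loops_eq (l : List Char) (i ans : Int) : aLoop l i 0 ans = bLoop l i ans := by
  cases l with
  | nil => simp [aLoop, bLoop]
  | cons c t =>
    rw [bLoop]
    by_cases hc : c = '1'
    · subst hc
      simp only [aLoop, List.takeWhile_cons, List.dropWhile_cons, beq_self_eq_true, if_true,
        List.length_cons]
      rw [if_neg (by norm_num : ¬ ((0:Int) + 1 > 2)), zero_add]
      rw [aLoop_ones t (i + 1) 1 i (le_refl 1) (by omega)]
      by_cases hbig : 2 < 1 + ((t.takeWhile (· == '1')).length : Int)
      · rw [if_pos hbig, if_pos (by push_cast at hbig ⊢; omega)]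
      · rw [if_neg hbig, if_neg (by push_cast at hbig ⊢; omega)]
        rw [aLoop_reset _ _ _ _ (fun x hx => by
          have := head_dropWhile (· == '1') t x hx
          simpa using this)]
        rw [loops_eq (t.dropWhile (· == '1')) (i + 1 + (t.takeWhile (· == '1')).length) i]
        congr 1
        omega
    · have hcb : (c == '1') = false := by simpa using hc
      simp only [aLoop, List.takeWhile_cons, List.dropWhile_cons, hcb, Bool.false_eq_true,
        if_false, beq_self_eq_true, if_true, List.length_cons]
      have hsplit : t.takeWhile (· == c) ++ t.dropWhile (· == c) = t :=
        List.takeWhile_append_dropWhile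
      conv_lhs => rw [← hsplit]
      rw [aLoop_skip _ (fun x hx => by
        have := List.mem_takeWhile_imp hx
        simp at this
        rw [this]; exact hc) (t.dropWhile (· == c)) (i + 1) ans]
      rw [loops_eq (t.dropWhile (· == c)) (i + 1 + (t.takeWhile (· == c)).length) ans]
      congr 1
      omega
  termination_by l.length
  decreasing_by
    all_goals exact Nat.lt_succ_of_le (List.length_dropWhile_le _ _)

-- ===== VERDICT (by name: the statement is the Claim_ definition above) =====
theorem count_consecutive_ones_spec : Claim_equal_count_consecutive_ones := by
  intro num _
  unfold Spec_count_consecutive_ones count_consecutive_ones count_consecutive_ones_alt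
  exact loops_eq _ _ _
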